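-- pv_equiv track=rewrite | github.com/sdingcn/mutual-refinement | extract-the-largest-cc.py | number_nodes
-- ===== SOURCE A (Python) =====
-- def number_nodes(raw_edges):
--     ctr = 0
--     node_to_number = {}
--     number_to_node = {}
--     for first, second, label in raw_edges:
--         if first not in node_to_number:
--             node_to_number[first] = ctr
--             number_to_node[ctr] = first
--             ctr += 1
--         if second not in node_to_number:
--             node_to_number[second] = ctr
--             number_to_node[ctr] = second
--             ctr += 1
--     return node_to_number, number_to_node
-- ===== SOURCE B (Python) =====
-- def number_nodes(raw_edges):
--     firstpos = {}
--     pos = 0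
--     for first, second, label in raw_edges:
--         firstpos.setdefault(first, pos)
--         firstpos.setdefault(second, pos + 1)
--         pos += 2
--     order = sorted(firstpos, key=firstpos.get)
--     node_to_number = {n: i for i, n in enumerate(order)}
--     number_to_node = dict(enumerate(order))
--     return node_to_number, number_to_node
-- ===== Notes on version B (the rewrite author's own statement) =====
-- stated objective: alternative
-- what changed: A maintains a running counter and two parallel dicts with membership guards; B instead records each node's first-occurrence POSITION in the endpoint stream (setdefault, position always advancing), recovers first-appearance order by sorting the nodes by that position, and only then builds both dicts by enumerating the sorted node list - ids come from a sort over recorded positions, not from a counter.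
import Mathlib
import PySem

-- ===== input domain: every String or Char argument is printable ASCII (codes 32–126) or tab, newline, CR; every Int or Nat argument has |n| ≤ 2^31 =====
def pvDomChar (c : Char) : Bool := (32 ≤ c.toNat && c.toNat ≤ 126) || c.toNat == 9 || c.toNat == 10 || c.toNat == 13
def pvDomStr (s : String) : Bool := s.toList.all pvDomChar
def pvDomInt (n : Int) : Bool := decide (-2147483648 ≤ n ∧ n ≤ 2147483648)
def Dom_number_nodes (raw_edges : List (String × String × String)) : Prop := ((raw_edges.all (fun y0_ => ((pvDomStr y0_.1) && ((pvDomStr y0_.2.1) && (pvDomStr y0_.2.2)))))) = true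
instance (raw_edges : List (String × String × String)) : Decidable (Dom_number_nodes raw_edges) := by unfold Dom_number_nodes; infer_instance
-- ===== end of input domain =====

-- B replaces A's counter-and-two-dicts pass by: record each node's first-occurrence position
-- in the endpoint stream, sort nodes by that position, enumerate; alternative algorithm, same results.


-- ===== PORT A =====
def number_nodes (raw_edges : List (String × String × String)) : (List (String × Int)) × (List (Int × String)) :=
  let fin := raw_edges.foldl
    (fun (st : Int × PySem.Dict String Int × PySem.Dict Int String) e =>
      -- if first not in node_to_number: …
      let st1 := if st.2.1.contains e.1 then st
                 else (st.1 + 1, st.2.1.insert e.1 st.1, st.2.2.insert st.1 e.1)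
      -- if second not in node_to_number: …
      if st1.2.1.contains e.2.1 then st1
      else (st1.1 + 1, st1.2.1.insert e.2.1 st1.1, st1.2.2.insert st1.1 e.2.1))
    ((0 : Int), PySem.Dict.empty, PySem.Dict.empty)
  (fin.2.1.items, fin.2.2.items)

-- ===== PORT B =====
def number_nodes_alt (raw_edges : List (String × String × String)) : (List (String × Int)) × (List (Int × String)) :=
  -- firstpos = {}; pos = 0; for first, second, label: setdefault(first, pos); setdefault(second, pos+1); pos += 2
  let fin := raw_edges.foldl
    (fun (st : PySem.Dict String Int × Int) e =>
      (((st.1.setdefault e.1 st.2).setdefault e.2.1 (st.2 + 1)), st.2 + 2))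
    (PySem.Dict.empty, (0 : Int))
  let firstpos := fin.1
  -- order = sorted(firstpos, key=firstpos.get)   (every key is present, so firstpos.get n = firstpos[n]; getD 0 is exact here)
  let order := PySem.List.sorted firstpos.keys (fun n => firstpos.getD n 0) false
  -- node_to_number = {n: i for i, n in enumerate(order)}
  let node_to_number := PySem.Dict.ofList ((PySem.List.enumerate order 0).map (fun p => (p.2, p.1)))
  -- number_to_node = dict(enumerate(order))
  let number_to_node := PySem.Dict.ofList (PySem.List.enumerate order 0)
  (node_to_number.items, number_to_node.items)

-- ===== PRECONDITION & SPEC =====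
def Spec_number_nodes (raw_edges : List (String × String × String)) (out : (List (String × Int)) × (List (Int × String))) : Prop := out = number_nodes_alt raw_edges
instance (raw_edges : List (String × String × String)) (out : (List (String × Int)) × (List (Int × String))) : Decidable (Spec_number_nodes raw_edges out) := by unfold Spec_number_nodes; infer_instance

-- ===== CLAIM (what is proved, stated in full; the proofs are below) =====
def Claim_equal_number_nodes : Prop := ∀ (raw_edges : List (String × String × String)), Dom_number_nodes raw_edges → Spec_number_nodes raw_edges (number_nodes raw_edges)

-- ===== LEMMAS AND PROOFS =====

-- ---- A side: A's fold equals the canonical "enumerate the deduped endpoint list" state ----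

-- one "add endpoint x" step of A, on the state (ctr, node_to_number, number_to_node)
def nnStep (st : Int × PySem.Dict String Int × PySem.Dict Int String) (x : String) :
    Int × PySem.Dict String Int × PySem.Dict Int String :=
  if st.2.1.contains x then st
  else (st.1 + 1, st.2.1.insert x st.1, st.2.2.insert st.1 x)

-- A's state after the distinct endpoints seen so far are exactly the list u
def nnState (u : List String) : Int × PySem.Dict String Int × PySem.Dict Int String :=
  ((u.length : Int),
   PySem.Dict.mk ((PySem.List.enumerate u 0).map (fun p => (p.2, p.1))),
   PySem.Dict.mk (PySem.List.enumerate u 0))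

theorem keysN (u : List String) :
    (PySem.Dict.mk ((PySem.List.enumerate u 0).map (fun p => (p.2, p.1)))).keys = u := by
  simp [PySem.Dict.keys_mk, List.map_map, Function.comp_def, PySem.List.map_snd_enumerate]

theorem keysI (u : List String) :
    (PySem.Dict.mk (PySem.List.enumerate u 0)).keys = PySem.List.pyRange 0 (u.length : Int) := by
  simpa using PySem.List.map_fst_enumerate u 0

theorem nnStep_state (u : List String) (x : String) :
    nnStep (nnState u) x = nnState (PySem.Set.add u x) := by
  by_cases hx : x ∈ u
  · have hc : (PySem.Dict.mk ((PySem.List.enumerate u 0).map (fun p => (p.2, p.1)))).contains x = true := by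
      rw [PySem.Dict.contains_eq_decide_mem_keys, keysN]; simpa
    have hs : PySem.Set.add u x = u := by
      simp [PySem.Set.add, PySem.Set.contains, hx]
    simp [nnStep, nnState, hc, hs]
  · have hc : (PySem.Dict.mk ((PySem.List.enumerate u 0).map (fun p => (p.2, p.1)))).contains x = false := by
      rw [PySem.Dict.contains_eq_decide_mem_keys, keysN]; simpa
    have hcI : (PySem.Dict.mk (PySem.List.enumerate u 0)).contains ((u.length : Int)) = false := by
      rw [PySem.Dict.contains_eq_decide_mem_keys, keysI]
      simp [PySem.List.mem_pyRange_one]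
    have hs : PySem.Set.add u x = u ++ [x] := by
      simp [PySem.Set.add, PySem.Set.contains, hx]
    have henum : PySem.List.enumerate (u ++ [x]) 0
        = PySem.List.enumerate u 0 ++ [((u.length : Int), x)] := by
      simp [PySem.List.enumerate_append, PySem.List.enumerate_cons, PySem.List.enumerate_nil]
    refine Prod.ext ?_ (Prod.ext ?_ ?_) <;> simp only [nnStep, nnState, hc, hs, Bool.false_eq_true, if_false]
    · simp
    · apply PySem.Dict.ext
      rw [PySem.Dict.items_insert_of_not_contains _ _ hc, henum]
      simp
    · apply PySem.Dict.ext
      rw [PySem.Dict.items_insert_of_not_contains _ _ hcI, henum]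

theorem foldl_nnStep (xs : List String) (u : List String) :
    xs.foldl nnStep (nnState u) = nnState (PySem.Set.update u xs) := by
  induction xs generalizing u with
  | nil => rfl
  | cons x xs ih =>
      rw [List.foldl_cons, nnStep_state, ih]
      rfl

-- A, rewritten as the endpoint-by-endpoint fold over the flattened endpoint list
theorem number_nodes_as_endpoints (raw_edges : List (String × String × String)) :
    number_nodes raw_edges =
      (let fin := (raw_edges.flatMap (fun e => [e.1, e.2.1])).foldl nnStep (nnState []) ;
       (fin.2.1.items, fin.2.2.items)) := by
  simp only [number_nodes, List.foldl_flatMap]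
  rfl

-- ---- B side: the firstpos fold keeps keys in first-appearance order with strictly increasing values ----

-- one edge step of B's first loop
def fpStep (st : PySem.Dict String Int × Int) (e : String × String × String) :
    PySem.Dict String Int × Int :=
  (((st.1.setdefault e.1 st.2).setdefault e.2.1 (st.2 + 1)), st.2 + 2)

-- one setdefault with a fresh, ≥-all value: keys evolve as Set.add, items stay position-sorted
theorem setdefault_inv (d : PySem.Dict String Int) (k : String) (v : Int)
    (hnd : d.keys.Nodup) (hpw : d.items.Pairwise (fun a b => a.2 < b.2))
    (hb : ∀ q ∈ d.items, q.2 < v) :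
    (d.setdefault k v).keys.Nodup ∧
    (d.setdefault k v).items.Pairwise (fun a b => a.2 < b.2) ∧
    (∀ q ∈ (d.setdefault k v).items, q.2 < v + 1) ∧
    (d.setdefault k v).keys = PySem.Set.add d.keys k := by
  by_cases hc : d.contains k = true
  · rw [PySem.Dict.setdefault_of_contains d v hc]
    have hk : k ∈ d.keys := (PySem.Dict.contains_iff_mem_keys d k).mp hc
    refine ⟨hnd, hpw, fun q hq => by have := hb q hq; omega, ?_⟩
    simp [PySem.Set.add, PySem.Set.contains, hk]
  · have hc' : d.contains k = false := by simpa using hc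
    rw [PySem.Dict.setdefault_of_not_contains d v hc']
    have hk : k ∉ d.keys := fun h => by
      simp [PySem.Dict.contains_eq_decide_mem_keys, h] at hc'
    have hitems : (d.insert k v).items = d.items ++ [(k, v)] :=
      PySem.Dict.items_insert_of_not_contains _ _ hc'
    refine ⟨?_, ?_, ?_, ?_⟩
    · rw [PySem.Dict.keys_insert_of_not_contains _ _ hc']
      exact List.Nodup.append hnd (List.nodup_singleton k)
        (by simpa using fun h => hk h)
    · rw [hitems]
      exact List.pairwise_append.mpr ⟨hpw, List.pairwise_singleton _ _,
        fun a ha b hb' => by simp at hb'; subst hb'; exact hb a ha⟩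
    · intro q hq
      rw [hitems] at hq
      rcases List.mem_append.mp hq with h | h
      · have := hb q h; omega
      · simp at h; subst h; omega
    · rw [PySem.Dict.keys_insert_of_not_contains _ _ hc']
      simp [PySem.Set.add, PySem.Set.contains, hk]

-- the whole first loop, by induction over the edges
theorem fpFold_inv (edges : List (String × String × String))
    (d : PySem.Dict String Int) (p : Int)
    (hnd : d.keys.Nodup) (hpw : d.items.Pairwise (fun a b => a.2 < b.2))
    (hb : ∀ q ∈ d.items, q.2 < p) :
    (edges.foldl fpStep (d, p)).1.keys.Nodup ∧
    (edges.foldl fpStep (d, p)).1.items.Pairwise (fun a b => a.2 < b.2) ∧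
    (∀ q ∈ (edges.foldl fpStep (d, p)).1.items, q.2 < (edges.foldl fpStep (d, p)).2) ∧
    (edges.foldl fpStep (d, p)).1.keys
      = PySem.Set.update d.keys (edges.flatMap (fun e => [e.1, e.2.1])) := by
  induction edges generalizing d p with
  | nil => exact ⟨hnd, hpw, hb, rfl⟩
  | cons e es ih =>
      obtain ⟨n1, p1, b1, k1⟩ := setdefault_inv d e.1 p hnd hpw hb
      obtain ⟨n2, p2, b2, k2⟩ :=
        setdefault_inv (d.setdefault e.1 p) e.2.1 (p + 1) n1 p1 b1
      have hb2 : ∀ q ∈ ((d.setdefault e.1 p).setdefault e.2.1 (p + 1)).items, q.2 < p + 2 :=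
        fun q hq => by have := b2 q hq; omega
      obtain ⟨N, P, B, K⟩ := ih _ _ n2 p2 hb2
      refine ⟨N, P, B, ?_⟩
      rw [List.foldl_cons] at *
      show (es.foldl fpStep (fpStep (d, p) e)).1.keys = _
      rw [show fpStep (d, p) e = (((d.setdefault e.1 p).setdefault e.2.1 (p + 1)), p + 2) from rfl] at *
      rw [K, k2, k1]
      rfl

-- a dict whose items are position-sorted with distinct keys: sorting its keys by lookup is the identity
theorem sorted_keys_id (l : List (String × Int))
    (hnd : (PySem.Dict.mk l).keys.Nodup)
    (hinc : l.Pairwise (fun a b => a.2 < b.2)) :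
    PySem.List.sorted (PySem.Dict.mk l).keys (fun n => (PySem.Dict.mk l).getD n 0) false
      = (PySem.Dict.mk l).keys := by
  apply PySem.List.sorted_eq_self_of_pairwise
  have hkeys : (PySem.Dict.mk l).keys = l.map Prod.fst := by simp [PySem.Dict.keys_mk]
  rw [hkeys, List.pairwise_map]
  refine hinc.imp_of_mem ?_
  intro a b ha hb hab
  have hga : (PySem.Dict.mk l).getD a.1 0 = a.2 :=
    PySem.Dict.getD_of_mem_items _ (by simpa using ha) hnd 0
  have hgb : (PySem.Dict.mk l).getD b.1 0 = b.2 :=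
    PySem.Dict.getD_of_mem_items _ (by simpa using hb) hnd 0
  rw [hga, hgb]; exact le_of_lt hab

-- B builds exactly the items lists of the dicts in nnState (dedup endpoints)
theorem items_ofList_pairsN (u : List String) (hu : u.Nodup) :
    (PySem.Dict.ofList ((PySem.List.enumerate u 0).map (fun p => (p.2, p.1)))).items
      = (PySem.List.enumerate u 0).map (fun p => (p.2, p.1)) := by
  have := PySem.Dict.items_foldl_insert_fresh
      ((PySem.List.enumerate u 0).map (fun p => (p.2, p.1)))
      (fun p => p.1) (fun p => p.2) (PySem.Dict.empty)
      (by intro a _; simp [PySem.Dict.contains, PySem.Dict.empty])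
      (by simpa [List.map_map, Function.comp_def, PySem.List.map_snd_enumerate] using hu)
  simpa [PySem.Dict.ofList, PySem.Dict.update, PySem.Dict.empty] using this

theorem items_ofList_enum (u : List String) :
    (PySem.Dict.ofList (PySem.List.enumerate u 0)).items = PySem.List.enumerate u 0 := by
  have := PySem.Dict.items_foldl_insert_fresh
      (PySem.List.enumerate u 0)
      (fun p => p.1) (fun p => p.2) (PySem.Dict.empty)
      (by intro a _; simp [PySem.Dict.contains, PySem.Dict.empty])
      (by simpa [PySem.List.map_fst_enumerate] using PySem.List.nodup_pyRange_one 0 (u.length : Int))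
  simpa [PySem.Dict.ofList, PySem.Dict.update, PySem.Dict.empty] using this

-- ===== VERDICT (by name: the statement is the Claim_ definition above) =====
theorem number_nodes_spec : Claim_equal_number_nodes := by
  intro raw_edges _
  show number_nodes raw_edges = number_nodes_alt raw_edges
  set ep := raw_edges.flatMap (fun e => [e.1, e.2.1]) with hep
  -- B's first loop produces a position-sorted dict whose keys are dedup ep
  obtain ⟨hnd, hpw, _, hkeys⟩ :=
    fpFold_inv raw_edges PySem.Dict.empty 0
      (by simp [PySem.Dict.keys, PySem.Dict.empty])
      (by simp [PySem.Dict.empty])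
      (by simp [PySem.Dict.empty])
  set fin := raw_edges.foldl fpStep (PySem.Dict.empty, (0 : Int)) with hfin
  have hkeys' : fin.1.keys = PySem.List.dedup ep := by
    rw [hkeys, ← hep, PySem.List.dedup_eq_ofList, PySem.Set.ofList_eq_foldl]
    rfl
  -- sorting the keys by their recorded first position is the identity
  have hsort : PySem.List.sorted fin.1.keys (fun n => fin.1.getD n 0) false = fin.1.keys := by
    obtain ⟨l, hl⟩ : ∃ l, fin.1 = PySem.Dict.mk l := ⟨fin.1.items, rfl⟩
    rw [hl] at hnd hpw ⊢
    exact sorted_keys_id l hnd hpw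
  have hu : PySem.Set.update ([] : List String) ep = PySem.List.dedup ep := by
    rw [PySem.List.dedup_eq_ofList, PySem.Set.ofList_eq_foldl]; rfl
  -- both sides reduce to the enumerate-dicts of u := dedup ep
  rw [number_nodes_as_endpoints]
  simp only [← hep, foldl_nnStep, hu]
  show ((nnState (PySem.List.dedup ep)).2.1.items, (nnState (PySem.List.dedup ep)).2.2.items)
      = number_nodes_alt raw_edges
  have hfold : raw_edges.foldl
      (fun (st : PySem.Dict String Int × Int) e =>
        (((st.1.setdefault e.1 st.2).setdefault e.2.1 (st.2 + 1)), st.2 + 2))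
      (PySem.Dict.empty, (0 : Int)) = fin := rfl
  simp only [number_nodes_alt, nnState]
  rw [hfold, hsort, hkeys',
    items_ofList_pairsN _ (PySem.List.nodup_dedup ep), items_ofList_enum]
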